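-- pv_equiv track=rewrite | github.com/adventum/airbyte | airbyte-integrations/connectors/source-appmetrica-logs-api/source_appmetrica_logs_api/streams/logs_api/stream.py | filters_into_request_params
-- ===== SOURCE A (Python) =====
-- from typing import Any, Iterable, Mapping, MutableMapping, Optional, List
--
-- def filters_into_request_params(
--     filters: list[Mapping[str, str]],
-- ) -> Mapping[str, Any]:
--     params = {}
--     for filter in filters:
--         if filter["name"] not in params.keys():
--             params[filter["name"]] = []
--         params[filter["name"]].append(filter["value"])
--     return params
-- ===== SOURCE B (Python) =====
-- def filters_into_request_params(filters):
--     names = list(dict.fromkeys(f["name"] for f in filters))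
--     return {n: [f["value"] for f in filters if f["name"] == n] for n in names}
-- ===== Notes on version B (the rewrite author's own statement) =====
-- stated objective: simpler
-- what changed: Replaces the scan with dict-membership checks and in-place appends by a two-pass grouping: first-occurrence dedup of the names, then one comprehension collecting each name's values.
import Mathlib
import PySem

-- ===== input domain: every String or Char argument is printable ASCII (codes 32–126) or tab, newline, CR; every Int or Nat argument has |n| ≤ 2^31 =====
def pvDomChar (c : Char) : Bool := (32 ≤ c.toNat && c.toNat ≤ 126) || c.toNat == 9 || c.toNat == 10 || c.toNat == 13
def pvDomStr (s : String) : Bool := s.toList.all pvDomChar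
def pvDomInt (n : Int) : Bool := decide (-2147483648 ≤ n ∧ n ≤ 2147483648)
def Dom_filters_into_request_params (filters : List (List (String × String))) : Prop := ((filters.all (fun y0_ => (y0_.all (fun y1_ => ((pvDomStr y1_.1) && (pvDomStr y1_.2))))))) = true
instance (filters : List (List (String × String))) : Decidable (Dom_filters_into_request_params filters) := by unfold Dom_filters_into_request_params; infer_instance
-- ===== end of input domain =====

-- B replaces A's single scan with dict-membership checks by a two-pass grouping
-- (first-occurrence dedup of names, then one value-collecting pass per name); same result, not faster.


-- filter["name"] / filter["value"]: first-match lookup in the association list; total via getD,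
-- Pre_ guarantees the keys are present (Python raises KeyError otherwise).
def pvName (f : List (String × String)) : String := (PySem.Dict.mk f).getD "name" ""
def pvValue (f : List (String × String)) : String := (PySem.Dict.mk f).getD "value" ""

-- ===== PORT A =====
def filters_into_request_params (filters : List (List (String × String))) : List (String × List String) :=
  (filters.foldl
    (fun params filt =>
      let params :=
        if params.contains (pvName filt) then params
        else params.insert (pvName filt) []      -- params[filter["name"]] = []
      params.modify (pvName filt) [] (fun l => l ++ [pvValue filt]))  -- params[...].append(filter["value"])
    PySem.Dict.empty).items

-- ===== PORT B =====
def filters_into_request_params_alt (filters : List (List (String × String))) : List (String × List String) :=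
  let names := PySem.List.dedup (filters.map pvName)   -- list(dict.fromkeys(...))
  names.map (fun n => (n, (filters.filter (fun f => pvName f == n)).map pvValue))

-- ===== PRECONDITION & SPEC =====
-- Pre_ excludes exactly the inputs where the Python A raises KeyError: a filter missing "name" or "value".
def Pre_filters_into_request_params (filters : List (List (String × String))) : Prop :=
  (filters.all (fun f => (PySem.Dict.mk f).contains "name" && (PySem.Dict.mk f).contains "value")) = true
instance (filters : List (List (String × String))) : Decidable (Pre_filters_into_request_params filters) := by unfold Pre_filters_into_request_params; infer_instance
def pvWitness_filters_into_request_params : (List (List (String × String))) :=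
  [[("name", "date"), ("value", "2024-01-01")], [("name", "date"), ("value", "2024-01-02")]]
def Spec_filters_into_request_params (filters : List (List (String × String))) (out : List (String × List String)) : Prop := out = filters_into_request_params_alt filters
instance (filters : List (List (String × String))) (out : List (String × List String)) : Decidable (Spec_filters_into_request_params filters out) := by unfold Spec_filters_into_request_params; infer_instance

-- ===== CLAIM (what is proved, stated in full; the proofs are below) =====
def Claim_equal_filters_into_request_params : Prop := ∀ (filters : List (List (String × String))), Dom_filters_into_request_params filters → Pre_filters_into_request_params filters → Spec_filters_into_request_params filters (filters_into_request_params filters)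

-- ===== LEMMAS AND PROOFS =====

-- A's "if absent, insert []" step followed by modify is the plain modify step.
theorem pv_insert_modify (d : PySem.Dict String (List String)) (k : String) (g : List String → List String)
    (h : d.contains k = false) :
    (d.insert k []).modify k [] g = d.modify k [] g := by
  have hk : ∀ p ∈ d.items, p.1 ≠ k := by
    intro p hp hpk
    have : k ∈ d.keys := by
      simp only [PySem.Dict.keys]; exact List.mem_map.mpr ⟨p, hp, hpk⟩
    rw [← PySem.Dict.contains_iff_mem_keys] at this
    simp [h] at this
  have hf : List.find? (fun p => p.1 == k) d.items = none :=
    List.find?_eq_none.mpr (fun p hp => by simp [hk p hp])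
  simp [PySem.Dict.modify, PySem.Dict.insert, PySem.Dict.getD, PySem.Dict.get?, h, hf]
  conv_rhs => rw [← List.map_id d.items]
  exact List.map_congr_left (fun p hp => by simp [hk p hp])

theorem pv_foldA_eq_foldM (filters : List (List (String × String))) (d : PySem.Dict String (List String)) :
    filters.foldl
      (fun params filt =>
        let params :=
          if params.contains (pvName filt) then params
          else params.insert (pvName filt) []
        params.modify (pvName filt) [] (fun l => l ++ [pvValue filt])) d
    = filters.foldl (fun params filt => params.modify (pvName filt) [] (fun l => l ++ [pvValue filt])) d := by
  induction filters generalizing d with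
  | nil => rfl
  | cons f fs ih =>
    simp only [List.foldl_cons]
    rw [← ih]
    by_cases h : d.contains (pvName f) = true
    · simp [h]
    · simp only [Bool.not_eq_true] at h
      simp [h, pv_insert_modify d (pvName f) _ h]

-- ===== VERDICT (by name: the statement is the Claim_ definition above) =====
theorem filters_into_request_params_spec : Claim_equal_filters_into_request_params := by
  intro filters _ _
  unfold Spec_filters_into_request_params filters_into_request_params filters_into_request_params_alt
  rw [pv_foldA_eq_foldM]
  have hfold : filters.foldl (fun params filt => params.modify (pvName filt) [] (fun l => l ++ [pvValue filt])) PySem.Dict.empty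
      = (filters.map (fun f => (pvName f, pvValue f))).foldl (fun d p => d.modify p.1 [] (fun l => l ++ [p.2])) PySem.Dict.empty := by
    rw [List.foldl_map]
  rw [hfold]
  set l := filters.map (fun f => (pvName f, pvValue f)) with hl
  set D := l.foldl (fun d p => d.modify p.1 [] (fun l => l ++ [p.2])) PySem.Dict.empty with hD
  have hnd : D.keys.Nodup := by
    rw [hD]
    exact PySem.Dict.nodup_keys_foldl_modify_key l Prod.fst [] (fun d p => fun v => v ++ [p.2]) PySem.Dict.empty (by simp)
  have hkeys : D.keys = PySem.Set.ofList (filters.map pvName) := by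
    rw [hD]
    rw [PySem.Dict.keys_foldl_modify_key]
    simp [hl, PySem.Set.update, PySem.Set.ofList, List.map_map, PySem.Dict.keys_empty, Function.comp_def]
  have hitems : D.items = D.keys.map (fun k => (k, D.getD k [])) :=
    PySem.Dict.items_eq_map_keys D hnd []
  rw [hitems, hkeys]
  rw [PySem.List.dedup_eq_ofList]
  apply List.map_congr_left
  intro n _
  have hget : D.getD n [] = (l.filter (fun p => p.1 == n)).map (fun p => p.2) := by
    rw [hD, PySem.Dict.getD_foldl_modify_append]
    simp
  rw [hget, hl]
  simp [List.filter_map, Function.comp_def]
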